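-- pv_equiv track=rewrite | github.com/j0ma/flores | scripts/stitch-segmentations-together.py | desegment_lmvr
-- ===== SOURCE A (Python) =====
-- LMVR_SEP = "+"
--
-- def is_lmvr_suffix(s):
--     return s.startswith(LMVR_SEP) and len(s) > 1
--
-- def desegment_lmvr(sentences):
--     """
--     Read in a corpus of sentences, and desegment
--     words according to the LMVR notation.
--     """
--     sentences_joined = []
--
--     for sent in sentences:
--         out = ""
--
--         for tok in sent.split(" "):
--             if is_lmvr_suffix(tok):
--                 out = "{}{}".format(out, tok[1:])
--             else:
--                 out = "{} {}".format(out, tok)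
--
--         sentences_joined.append(out.lstrip())
--
--     return sentences_joined
-- ===== SOURCE B (Python) =====
-- import re
--
-- # One regex substitution per sentence: delete the space (or start-of-string)
-- # plus '+' exactly where a '+'-led suffix token follows, then lstrip as A does.
-- _SUFFIX_JOIN = re.compile(r"(^| )\+(?=[^ ])")
--
-- def desegment_lmvr(sentences):
--     return [_SUFFIX_JOIN.sub("", sent).lstrip() for sent in sentences]
-- ===== Notes on version B (the rewrite author's own statement) =====
-- stated objective: idiomatic
-- what changed: Replaces the per-token split-and-accumulate loop by a single compiled regex substitution per sentence that deletes the joining space (or string start) before each '+'-led suffix token, followed by the same lstrip.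
import Mathlib
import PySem

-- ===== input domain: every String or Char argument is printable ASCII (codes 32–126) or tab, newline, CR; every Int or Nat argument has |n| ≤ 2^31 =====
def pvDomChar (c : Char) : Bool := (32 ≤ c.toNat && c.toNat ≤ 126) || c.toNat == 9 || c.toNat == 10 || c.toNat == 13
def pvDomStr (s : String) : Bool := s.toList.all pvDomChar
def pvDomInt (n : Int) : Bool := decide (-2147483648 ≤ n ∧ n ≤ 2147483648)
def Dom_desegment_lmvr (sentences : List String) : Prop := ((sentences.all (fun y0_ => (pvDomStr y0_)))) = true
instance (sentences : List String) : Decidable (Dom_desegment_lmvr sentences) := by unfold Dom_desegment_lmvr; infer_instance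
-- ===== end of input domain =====

-- B replaces A's token-split-and-accumulate loop by one regex substitution per sentence
-- (delete " +"/leading "+" when a non-space follows) plus the same lstrip (more idiomatic).

-- ===== PORT A =====
def pv_is_lmvr_suffix (s : String) : Bool :=
  PySem.Str.startswith s "+" && decide ((1 : Int) < PySem.Str.len s)

def desegment_lmvr (sentences : List String) : List String :=
  sentences.foldl (fun sentences_joined sent =>
    let out := ((PySem.Chars.splitOn sent.toList " ".toList).map String.ofList).foldl
      (fun out tok =>
        if pv_is_lmvr_suffix tok then out ++ PySem.Str.slice tok (some 1) none
        else out ++ " " ++ tok) ""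
    sentences_joined ++ [PySem.Str.lstrip out]) []

-- ===== PORT B =====
-- Hand port (exact) of re.sub(r"(^| )\+(?=[^ ])", "", sent) for this fixed pattern:
-- pvGo is the left-to-right scan from a non-start position, pvSub adds the '^' alternative at position 0.
def pvGo : List Char → List Char
  | [] => []
  | [c] => [c]
  | c :: d :: rest =>
      if c = ' ' then
        if d = '+' then
          match rest with
          | [] => [' ', '+']                                     -- lookahead fails at end: no match
          | e :: _ => if e = ' ' then ' ' :: '+' :: pvGo rest    -- lookahead fails: no match here
                      else pvGo rest                             -- match " +": delete it, resume at e
        else c :: pvGo (d :: rest)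
      else c :: pvGo (d :: rest)

def pvSub (l : List Char) : List Char :=
  match l with
  | c :: d :: r => if c = '+' then (if d = ' ' then pvGo l else pvGo (d :: r)) else pvGo l
  | _ => pvGo l

def desegment_lmvr_alt (sentences : List String) : List String :=
  sentences.map fun sent => PySem.Str.lstrip (String.ofList (pvSub sent.toList))

-- ===== PRECONDITION & SPEC =====
def Spec_desegment_lmvr (sentences : List String) (out : List String) : Prop := out = desegment_lmvr_alt sentences
instance (sentences : List String) (out : List String) : Decidable (Spec_desegment_lmvr sentences out) := by unfold Spec_desegment_lmvr; infer_instance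

-- ===== CLAIM (what is proved, stated in full; the proofs are below) =====
def Claim_equal_desegment_lmvr : Prop := ∀ (sentences : List String), Dom_desegment_lmvr sentences → Spec_desegment_lmvr sentences (desegment_lmvr sentences)

-- ===== LEMMAS AND PROOFS =====

-- contribution of one token to A's accumulator
def pvBody (t : List Char) : List Char :=
  if PySem.Chars.startswith t ['+'] && decide ((1 : Int) < (t.length : Int)) then t.drop 1 else ' ' :: t

-- simple recursive split on a single space
def pvSplit1 : List Char → List (List Char)
  | [] => [[]]
  | c :: r =>
      if c = ' ' then [] :: pvSplit1 r
      else match pvSplit1 r with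
           | t :: ts => (c :: t) :: ts
           | [] => [[c]]

-- what A's concatenated token bodies amount to, phrased via B's scanner
def pvHead (l : List Char) : List Char :=
  match l with
  | c :: d :: r => if c = '+' then (if d = ' ' then ' ' :: pvGo l else pvGo (d :: r)) else ' ' :: pvGo l
  | _ => ' ' :: pvGo l

theorem pvBody_nil : pvBody [] = [' '] := by decide

theorem pvBody_one (c : Char) : pvBody [c] = [' ', c] := by
  simp [pvBody]

theorem pvBody_suffix (d : Char) (t : List Char) : pvBody ('+' :: d :: t) = d :: t := by
  have h1 : PySem.Chars.startswith ('+' :: d :: t) ['+'] = true := by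
    simp [PySem.Chars.startswith, List.isPrefixOf]
  simp [pvBody, h1]

theorem pvBody_ne (c : Char) (t : List Char) (h : c ≠ '+') : pvBody (c :: t) = ' ' :: c :: t := by
  have h1 : PySem.Chars.startswith (c :: t) ['+'] = false := by
    simp [PySem.Chars.startswith, List.isPrefixOf, Ne.symm h]
  simp [pvBody, h1]

theorem pvSplit1_nil : pvSplit1 [] = [[]] := rfl

theorem pvSplit1_space (r : List Char) : pvSplit1 (' ' :: r) = [] :: pvSplit1 r := by
  simp [pvSplit1]

theorem pvSplit1_ne (c : Char) (r : List Char) (t : List Char) (ts : List (List Char))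
    (h : c ≠ ' ') (h2 : pvSplit1 r = t :: ts) : pvSplit1 (c :: r) = (c :: t) :: ts := by
  simp [pvSplit1, h, h2]

theorem pvSplit1_ne_nil (l : List Char) : pvSplit1 l ≠ [] := by
  cases l with
  | nil => simp [pvSplit1]
  | cons c r =>
    simp only [pvSplit1]
    split_ifs
    · simp
    · cases h : pvSplit1 r <;> simp

theorem pvGo_one (c : Char) : pvGo [c] = [c] := by simp [pvGo]

theorem pvGo_cons_ne (c : Char) (r : List Char) (h : c ≠ ' ') : pvGo (c :: r) = c :: pvGo r := by
  cases r with
  | nil => simp [pvGo]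
  | cons d r' => simp [pvGo, h]

theorem pvGo_sp_plus (e : Char) (r : List Char) :
    pvGo (' ' :: '+' :: e :: r) = if e = ' ' then ' ' :: '+' :: pvGo (e :: r) else pvGo (e :: r) := by
  simp [pvGo]

theorem pvGo_sp_ne (d : Char) (r : List Char) (h : d ≠ '+') :
    pvGo (' ' :: d :: r) = ' ' :: pvGo (d :: r) := by
  simp [pvGo, h]

theorem pvHead_nil : pvHead [] = [' '] := rfl

theorem pvHead_one (c : Char) : pvHead [c] = [' ', c] := by
  simp [pvHead, pvGo]

theorem pvHead_plus (d : Char) (r : List Char) :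
    pvHead ('+' :: d :: r) = if d = ' ' then ' ' :: pvGo ('+' :: d :: r) else pvGo (d :: r) := by
  simp [pvHead]

theorem pvHead_ne (c d : Char) (r : List Char) (h : c ≠ '+') :
    pvHead (c :: d :: r) = ' ' :: pvGo (c :: d :: r) := by
  simp [pvHead, h]

theorem pvSub_ne (c d : Char) (r : List Char) (h : c ≠ '+') :
    pvSub (c :: d :: r) = pvGo (c :: d :: r) := by
  simp [pvSub, h]

theorem pvGo_space (r : List Char) : pvGo (' ' :: r) = pvHead r := by
  cases r with
  | nil => simp [pvGo, pvHead]
  | cons d r' =>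
    by_cases hd : d = '+'
    · subst hd
      cases r' with
      | nil => decide
      | cons e r'' =>
        rw [pvGo_sp_plus, pvHead_plus]
        by_cases he : e = ' '
        · subst he
          simp [pvGo_cons_ne '+' _ (by decide)]
        · simp [he]
    · cases r' with
      | nil => simp [pvGo, pvHead, hd]
      | cons e r'' => rw [pvGo_sp_ne _ _ hd, pvHead_ne _ _ _ hd]

theorem pvMain (n : Nat) : ∀ l : List Char, l.length ≤ n →
    (pvGo l = (pvSplit1 l).headI ++ (pvSplit1 l).tail.flatMap pvBody) ∧
    ((pvSplit1 l).flatMap pvBody = pvHead l) := by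
  induction n with
  | zero =>
    intro l hl
    cases l with
    | nil => constructor <;> decide
    | cons c r => simp at hl
  | succ n ih =>
    intro l hl
    cases l with
    | nil => constructor <;> decide
    | cons c r =>
      cases r with
      | nil =>
        by_cases hc : c = ' '
        · subst hc; constructor <;> decide
        · constructor
          · rw [pvGo_one, pvSplit1_ne c [] [] [] hc pvSplit1_nil]; simp
          · rw [pvSplit1_ne c [] [] [] hc pvSplit1_nil]
            simp [pvBody_one, pvHead_one]
      | cons d rest =>
        have hlen : (d :: rest).length ≤ n := by simp at hl ⊢; omega
        have hrest : rest.length ≤ n := by simp at hl ⊢; omega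
        constructor
        · -- M2
          by_cases hc : c = ' '
          · subst hc
            by_cases hd : d = '+'
            · subst hd
              cases rest with
              | nil => decide
              | cons e r' =>
                obtain ⟨t, ts, hsp⟩ := List.exists_cons_of_ne_nil (pvSplit1_ne_nil r')
                by_cases he : e = ' '
                · subst he
                  have h2 := (ih (' ' :: r') (by simp at hl ⊢; omega)).1
                  rw [pvSplit1_space r'] at h2
                  simp only [List.headI, List.tail, List.nil_append] at h2
                  rw [pvGo_sp_plus]
                  rw [pvSplit1_space, pvSplit1_ne '+' _ _ _ (by decide) (pvSplit1_space r')]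
                  simp [pvBody_one, h2]
                · have h2 := (ih (e :: r') (by simp at hl ⊢; omega)).1
                  rw [pvSplit1_ne e r' t ts he hsp] at h2
                  simp only [List.headI, List.tail] at h2
                  rw [pvGo_sp_plus]
                  rw [pvSplit1_space, pvSplit1_ne '+' _ _ _ (by decide) (pvSplit1_ne e r' t ts he hsp)]
                  simp [he, pvBody_suffix, h2]
            · have h1 := (ih (d :: rest) hlen).2
              rw [pvGo_sp_ne d rest hd, pvSplit1_space]
              simp only [List.headI, List.tail, List.nil_append]
              rw [h1]
              cases rest with
              | nil => simp [pvHead_one, pvGo_one]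
              | cons e r'' => rw [pvHead_ne _ _ _ hd]
          · obtain ⟨t, ts, hsp⟩ := List.exists_cons_of_ne_nil (pvSplit1_ne_nil (d :: rest))
            have h2 := (ih (d :: rest) hlen).1
            rw [hsp] at h2
            simp only [List.headI, List.tail] at h2
            rw [pvGo_cons_ne c _ hc, pvSplit1_ne c _ t ts hc hsp, h2]
            simp
        · -- M1
          by_cases hc : c = ' '
          · subst hc
            have h1 := (ih (d :: rest) hlen).2
            rw [pvSplit1_space]
            simp only [List.flatMap_cons, pvBody_nil]
            rw [h1, pvHead_ne _ _ _ (by decide), pvGo_space]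
            simp
          · by_cases hp : c = '+'
            · subst hp
              by_cases hd : d = ' '
              · subst hd
                have h1 := (ih rest hrest).2
                rw [pvSplit1_ne '+' _ _ _ (by decide) (pvSplit1_space rest)]
                rw [pvHead_plus]
                simp only [List.flatMap_cons, pvBody_one]
                rw [pvGo_cons_ne '+' _ (by decide), pvGo_space, h1]
                simp
              · obtain ⟨t, ts, hsp⟩ := List.exists_cons_of_ne_nil (pvSplit1_ne_nil rest)
                have h2 := (ih (d :: rest) hlen).1
                rw [pvSplit1_ne d rest t ts hd hsp] at h2
                simp only [List.headI, List.tail] at h2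
                rw [pvSplit1_ne '+' _ _ _ (by decide) (pvSplit1_ne d rest t ts hd hsp)]
                rw [pvHead_plus]
                simp [hd, pvBody_suffix, h2]
            · obtain ⟨t, ts, hsp⟩ := List.exists_cons_of_ne_nil (pvSplit1_ne_nil (d :: rest))
              have h2 := (ih (d :: rest) hlen).1
              rw [hsp] at h2
              simp only [List.headI, List.tail] at h2
              rw [pvSplit1_ne c _ t ts hc hsp, pvHead_ne _ _ _ hp, pvGo_cons_ne c _ hc, h2]
              simp [pvBody_ne c t hp]

theorem pvGo_splitOn (l : List Char) : ∀ (fuel : Nat) (cur : List Char) (acc : List (List Char)),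
    l.length < fuel →
    PySem.Chars.splitOn.go [' '] fuel l cur acc
      = acc.reverse ++ (cur.reverse ++ (pvSplit1 l).headI) :: (pvSplit1 l).tail := by
  induction l with
  | nil =>
    intro fuel cur acc hf
    cases fuel with
    | zero => omega
    | succ f => simp [PySem.Chars.splitOn.go, pvSplit1]
  | cons c rest ih =>
    intro fuel cur acc hf
    cases fuel with
    | zero => omega
    | succ f =>
      have hf' : rest.length < f := by simp at hf; omega
      by_cases hc : c = ' '
      · subst hc
        rw [show PySem.Chars.splitOn.go [' '] (f + 1) (' ' :: rest) cur acc
              = PySem.Chars.splitOn.go [' '] f rest [] (cur.reverse :: acc) by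
            simp [PySem.Chars.splitOn.go, List.isPrefixOf]]
        rw [ih f [] (cur.reverse :: acc) hf']
        obtain ⟨t, ts, hsp⟩ := List.exists_cons_of_ne_nil (pvSplit1_ne_nil rest)
        rw [pvSplit1_space, hsp]
        simp
      · rw [show PySem.Chars.splitOn.go [' '] (f + 1) (c :: rest) cur acc
              = PySem.Chars.splitOn.go [' '] f rest (c :: cur) acc by
            simp [PySem.Chars.splitOn.go, List.isPrefixOf, Ne.symm hc]]
        rw [ih f (c :: cur) acc hf']
        obtain ⟨t, ts, hsp⟩ := List.exists_cons_of_ne_nil (pvSplit1_ne_nil rest)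
        rw [pvSplit1_ne c rest t ts hc hsp, hsp]
        simp

theorem pvSplitOn_eq (l : List Char) : PySem.Chars.splitOn l [' '] = pvSplit1 l := by
  unfold PySem.Chars.splitOn
  rw [pvGo_splitOn l (l.length + 1) [] [] (by omega)]
  obtain ⟨t, ts, hsp⟩ := List.exists_cons_of_ne_nil (pvSplit1_ne_nil l)
  rw [hsp]
  simp

theorem pvLstrip_cons_space (x : List Char) :
    PySem.Chars.lstrip (' ' :: x) = PySem.Chars.lstrip x := by
  simp [PySem.Chars.lstrip, show PySem.Chars.isspace ' ' = true from by decide]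

theorem pvLstrip_head (l : List Char) :
    PySem.Chars.lstrip (pvHead l) = PySem.Chars.lstrip (pvSub l) := by
  cases l with
  | nil => rw [pvHead_nil]; simp [pvSub, pvGo, pvLstrip_cons_space]
  | cons c r =>
    cases r with
    | nil => rw [pvHead_one]; simp [pvSub, pvGo_one]; rw [show [' ', c] = ' ' :: [c] from rfl, pvLstrip_cons_space]
    | cons d rest =>
      by_cases hc : c = '+'
      · subst hc
        rw [pvHead_plus]
        by_cases hd : d = ' '
        · subst hd; simp [pvSub, pvLstrip_cons_space]
        · simp [pvSub, hd]
      · rw [pvHead_ne _ _ _ hc, pvSub_ne _ _ _ hc, pvLstrip_cons_space]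

theorem pvInner (toks : List (List Char)) (acc : String) :
    ((toks.map String.ofList).foldl
      (fun out tok =>
        if pv_is_lmvr_suffix tok then out ++ PySem.Str.slice tok (some 1) none
        else out ++ " " ++ tok) acc).toList
    = acc.toList ++ toks.flatMap pvBody := by
  induction toks generalizing acc with
  | nil => simp
  | cons t ts ih =>
    simp only [List.map_cons, List.foldl_cons, List.flatMap_cons]
    rw [ih]
    have haux : ((if pv_is_lmvr_suffix (String.ofList t) then
          acc ++ PySem.Str.slice (String.ofList t) (some 1) none
        else acc ++ " " ++ String.ofList t)).toList = acc.toList ++ pvBody t := by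
      by_cases h : pv_is_lmvr_suffix (String.ofList t)
      · have hb : (PySem.Chars.startswith t ['+'] && decide ((1 : Int) < (t.length : Int))) = true := by
          simpa [pv_is_lmvr_suffix, PySem.Str.startswith, PySem.Str.len] using h
        simp only [Bool.and_eq_true, decide_eq_true_eq] at hb
        have h2 : 1 < t.length := by exact_mod_cast hb.2
        simp [h, pvBody, PySem.Str.slice, PySem.List.slice_from, hb.1, h2]
      · have hb : (PySem.Chars.startswith t ['+'] && decide ((1 : Int) < (t.length : Int))) = false := by
          simpa [pv_is_lmvr_suffix, PySem.Str.startswith, PySem.Str.len] using h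
        have hb2 : PySem.Chars.startswith t ['+'] = true → t.length ≤ 1 := by
          intro hs
          rw [hs] at hb
          simp at hb
          omega
        simp [h, pvBody]
        intro hs hl
        have := hb2 hs
        omega
    rw [haux, List.append_assoc]

theorem pvPerSentence (sent : String) :
    PySem.Str.lstrip (((PySem.Chars.splitOn sent.toList [' ']).map String.ofList).foldl
      (fun out tok =>
        if pv_is_lmvr_suffix tok then out ++ PySem.Str.slice tok (some 1) none
        else out ++ " " ++ tok) "")
    = PySem.Str.lstrip (String.ofList (pvSub sent.toList)) := by
  unfold PySem.Str.lstrip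
  congr 1
  rw [pvInner]
  rw [pvSplitOn_eq]
  have hm := (pvMain sent.toList.length sent.toList (le_refl _)).2
  simp [hm, pvLstrip_head]

theorem pvOuter (ss : List String) (acc : List String) :
    ss.foldl (fun sentences_joined sent =>
      let out := ((PySem.Chars.splitOn sent.toList " ".toList).map String.ofList).foldl
        (fun out tok =>
          if pv_is_lmvr_suffix tok then out ++ PySem.Str.slice tok (some 1) none
          else out ++ " " ++ tok) ""
      sentences_joined ++ [PySem.Str.lstrip out]) acc
    = acc ++ ss.map (fun sent => PySem.Str.lstrip (String.ofList (pvSub sent.toList))) := by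
  induction ss generalizing acc with
  | nil => simp
  | cons s ss ih =>
    simp only [List.foldl_cons, List.map_cons]
    rw [ih]
    simp [pvPerSentence]

-- ===== VERDICT (by name: the statement is the Claim_ definition above) =====
theorem desegment_lmvr_spec : Claim_equal_desegment_lmvr := by
  intro sentences _
  unfold Spec_desegment_lmvr desegment_lmvr desegment_lmvr_alt
  rw [pvOuter]
  simp
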